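-- pv_equiv track=rewrite | github.com/genomicsITER/NanoCLUST | templates/kmer_freq.py | combine_kmers_list
-- ===== SOURCE A (Python) =====
-- def rev_comp_motif( motif ):
--     """
--     Return the reverse complement of the input motif.
--     """
--     COMP = {"A":"T", \
--             "T":"A", \
--             "C":"G", \
--             "G":"C", \
--             "W":"S", \
--             "S":"W", \
--             "M":"K", \
--             "K":"M", \
--             "R":"Y", \
--             "Y":"R", \
--             "B":"V", \
--             "D":"H", \
--             "H":"D", \
--             "V":"B", \
--             "N":"N", \
--             "X":"X", \
--             "*":"*"}
--     rc_motif = []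
--     for char in motif[::-1]:
--         rc_motif.append( COMP[char] )
--     return "".join(rc_motif)
--
-- def combine_kmers_list( all_kmers ):
--     combined = set()
--     for kmer in all_kmers:
--         if rev_comp_motif(kmer) in combined:
--             pass
--         else:
--             combined.add(kmer)
--     combined = list(combined)
--     combined.sort()
--     return combined
-- ===== SOURCE B (Python) =====
-- def rev_comp_motif( motif ):
--     """
--     Return the reverse complement of the input motif.
--     """
--     COMP = {"A":"T", "T":"A", "C":"G", "G":"C", "W":"S", "S":"W", "M":"K",
--             "K":"M", "R":"Y", "Y":"R", "B":"V", "D":"H", "H":"D", "V":"B",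
--             "N":"N", "X":"X", "*":"*"}
--     return "".join(COMP[char] for char in reversed(motif))
--
-- def combine_kmers_list( all_kmers ):
--     # stage 1: all reverse complements up front (KeyError fires at the same first invalid kmer)
--     rcs = [rev_comp_motif(k) for k in all_kmers]
--     # stage 2: keep the first-seen original of each reverse-complement class, keyed canonically
--     seen = set()
--     keep = []
--     for kmer, rc in zip(all_kmers, rcs):
--         canonical = min(kmer, rc)
--         if canonical not in seen:
--             seen.add(canonical)
--             keep.append(kmer)
--     return sorted(keep)
-- ===== Notes on version B (the rewrite author's own statement) =====
-- stated objective: alternative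
-- what changed: B is two staged passes: it first precomputes the reverse complement of every kmer, then scans the zipped pairs grouping by the canonical key min(kmer, rev_comp(kmer)), keeping the first-seen original kmer per class in an ordered keep list and a seen-key set, and sorts the keep list; A instead interleaves rev_comp computation with a membership test of the reverse complement against the set of already-kept kmers.
import Mathlib
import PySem

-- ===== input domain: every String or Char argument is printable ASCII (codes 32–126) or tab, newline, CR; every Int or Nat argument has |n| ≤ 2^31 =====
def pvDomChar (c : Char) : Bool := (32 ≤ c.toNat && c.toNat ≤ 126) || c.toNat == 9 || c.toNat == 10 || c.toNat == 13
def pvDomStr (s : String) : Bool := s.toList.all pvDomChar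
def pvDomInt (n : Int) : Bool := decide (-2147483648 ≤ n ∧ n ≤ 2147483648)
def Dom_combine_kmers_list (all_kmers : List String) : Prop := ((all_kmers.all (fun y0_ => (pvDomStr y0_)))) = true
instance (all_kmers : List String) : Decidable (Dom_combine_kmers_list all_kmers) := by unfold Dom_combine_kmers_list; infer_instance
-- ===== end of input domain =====

-- B re-implements the dedup in two staged passes: precompute every reverse complement, then a
-- first-seen scan keyed by the canonical min(kmer, rev_comp(kmer)) over the zipped pairs (alternative; same cost).


-- ===== PORT A =====
-- the COMP dict of rev_comp_motif (shared by both versions, like the Python helper's literal)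
def pvCOMP : PySem.Dict Char Char := PySem.Dict.ofList
  [('A','T'),('T','A'),('C','G'),('G','C'),('W','S'),('S','W'),('M','K'),('K','M'),
   ('R','Y'),('Y','R'),('B','V'),('D','H'),('H','D'),('V','B'),('N','N'),('X','X'),('*','*')]

-- A's rev_comp_motif: append loop over motif[::-1]; none = KeyError (COMP[char] on a char outside the dict)
def rev_comp_motif (motif : String) : Option String :=
  (motif.toList.reverse.foldl
    (fun st c => st.bind fun acc => (pvCOMP.get? c).map fun r => acc ++ [r])
    (some ([] : List Char))).map String.ofList

-- A: keep kmer unless its reverse complement is already in the kept set; sort at the end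
def combine_kmers_list (all_kmers : List String) : List String :=
  ((all_kmers.foldl
    (fun st kmer => st.bind fun combined =>
      (rev_comp_motif kmer).map fun rc =>
        if PySem.Set.contains combined rc then combined else PySem.Set.add combined kmer)
    (some (PySem.Set.empty : PySem.Set String))
  ).map (fun combined => PySem.List.sorted combined (fun x => x) false)).getD []

-- ===== PORT B =====
-- B's rev_comp_motif: "".join(COMP[c] for c in reversed(motif)); none = KeyError
def rev_comp_motif_alt (motif : String) : Option String :=
  (motif.toList.reverse.mapM (fun c => pvCOMP.get? c)).map String.ofList

-- B's stage 2: first-seen scan over (kmer, rc) pairs keyed by canonical = min(kmer, rc)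
def pvScan : List (String × String) → PySem.Set String → List String → List String
  | [], _, keep => keep
  | (kmer, rc) :: rest, seen, keep =>
    let canonical := if rc < kmer then rc else kmer
    if PySem.Set.contains seen canonical then pvScan rest seen keep
    else pvScan rest (PySem.Set.add seen canonical) (keep ++ [kmer])

-- B: precompute all reverse complements, scan the zip, sort the kept originals
def combine_kmers_list_alt (all_kmers : List String) : List String :=
  match all_kmers.mapM rev_comp_motif_alt with
  | none => []   -- KeyError: outside Pre_
  | some rcs => PySem.List.sorted (pvScan (all_kmers.zip rcs) PySem.Set.empty []) (fun x => x) false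

-- ===== PRECONDITION & SPEC =====
def pvAlphabet : List Char := ['A','T','C','G','W','S','M','K','R','Y','B','D','H','V','N','X','*']

-- Pre_ excludes exactly the inputs on which A's COMP[char] lookup raises KeyError
def Pre_combine_kmers_list (all_kmers : List String) : Prop :=
  (all_kmers.all (fun kmer => kmer.toList.all (fun c => pvAlphabet.contains c))) = true
instance (all_kmers : List String) : Decidable (Pre_combine_kmers_list all_kmers) := by
  unfold Pre_combine_kmers_list; infer_instance

def pvWitness_combine_kmers_list : List String := ["AT"]

def Spec_combine_kmers_list (all_kmers : List String) (out : List String) : Prop :=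
  out = combine_kmers_list_alt all_kmers
instance (all_kmers : List String) (out : List String) : Decidable (Spec_combine_kmers_list all_kmers out) := by
  unfold Spec_combine_kmers_list; infer_instance

-- ===== CLAIM (what is proved, stated in full; the proofs are below) =====
def Claim_equal_combine_kmers_list : Prop := ∀ (all_kmers : List String), Dom_combine_kmers_list all_kmers → Pre_combine_kmers_list all_kmers → Spec_combine_kmers_list all_kmers (combine_kmers_list all_kmers)

-- ===== LEMMAS AND PROOFS =====

-- the pure complement function, defined only for proof purposes
def pvF (c : Char) : Char := (pvCOMP.get? c).getD c

lemma pvF_spec : ∀ c ∈ pvAlphabet, pvCOMP.get? c = some (pvF c) ∧ pvF c ∈ pvAlphabet ∧ pvF (pvF c) = c := by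
  intro c hc
  fin_cases hc <;> exact ⟨rfl, by decide, rfl⟩

-- the pure reverse complement and canonical representative, for proof purposes
def pvRC (s : String) : String := String.ofList (s.toList.reverse.map pvF)
def pvCanon (s : String) : String := if pvRC s < s then pvRC s else s

def pvValid (s : String) : Prop := ∀ c ∈ s.toList, c ∈ pvAlphabet

lemma mapM_eq_map (l : List Char) (h : ∀ c ∈ l, c ∈ pvAlphabet) :
    l.mapM (fun c => pvCOMP.get? c) = some (l.map pvF) := by
  induction l with
  | nil => rfl
  | cons c t ih =>
    have hc := (pvF_spec c (h c (by simp))).1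
    simp [List.mapM_cons, hc, ih (fun x hx => h x (by simp [hx]))]

lemma foldl_append_map (l : List Char) (acc : List Char) (h : ∀ c ∈ l, c ∈ pvAlphabet) :
    l.foldl (fun st c => st.bind fun a => (pvCOMP.get? c).map fun r => a ++ [r]) (some acc)
      = some (acc ++ l.map pvF) := by
  induction l generalizing acc with
  | nil => simp
  | cons c t ih =>
    have hc := (pvF_spec c (h c (by simp))).1
    simp only [List.foldl_cons, Option.bind_some, hc, Option.map_some, List.map_cons]
    rw [ih _ (fun x hx => h x (by simp [hx]))]
    simp

lemma rcA_valid (m : String) (h : pvValid m) : rev_comp_motif m = some (pvRC m) := by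
  unfold rev_comp_motif pvRC
  rw [foldl_append_map _ _ (fun c hc => h c (List.mem_reverse.mp hc))]
  simp

lemma rcB_valid (m : String) (h : pvValid m) : rev_comp_motif_alt m = some (pvRC m) := by
  unfold rev_comp_motif_alt pvRC
  rw [mapM_eq_map _ (fun c hc => h c (List.mem_reverse.mp hc))]
  rfl

lemma mapM_rcB (l : List String) (h : ∀ k ∈ l, pvValid k) :
    l.mapM rev_comp_motif_alt = some (l.map pvRC) := by
  induction l with
  | nil => rfl
  | cons k t ih =>
    simp [List.mapM_cons, rcB_valid k (h k (by simp)), ih (fun x hx => h x (by simp [hx]))]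

lemma zip_map_self (l : List String) : l.zip (l.map pvRC) = l.map (fun k => (k, pvRC k)) := by
  induction l with
  | nil => rfl
  | cons k t ih => simp [ih]

lemma pvRC_pvRC (m : String) (h : pvValid m) : pvRC (pvRC m) = m := by
  unfold pvRC
  rw [String.toList_ofList, ← List.map_reverse, List.reverse_reverse, List.map_map]
  have : m.toList.map (pvF ∘ pvF) = m.toList.map id := by
    apply List.map_congr_left
    intro a ha
    exact (pvF_spec a (h a ha)).2.2
  rw [this, List.map_id]
  exact String.ofList_toList

lemma pvCanon_pvRC (k : String) (hk : pvValid k) : pvCanon (pvRC k) = pvCanon k := by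
  unfold pvCanon
  rw [pvRC_pvRC k hk]
  rcases lt_trichotomy (pvRC k) k with h | h | h
  · simp [h, not_lt.mpr (le_of_lt h)]
  · simp [h]
  · simp [h, not_lt.mpr (le_of_lt h)]

lemma canon_cases (s : String) : pvCanon s = s ∨ pvCanon s = pvRC s := by
  unfold pvCanon; split_ifs <;> simp

lemma canon_eq_elim (s k : String) (hs : pvValid s) (hk : pvValid k)
    (h : pvCanon s = pvCanon k) : s = k ∨ s = pvRC k := by
  rcases canon_cases s with h1 | h1 <;> rcases canon_cases k with h2 | h2
  · left; rw [← h1, h, h2]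
  · right; rw [← h1, h, h2]
  · right
    have : pvRC s = k := by rw [← h2, ← h, h1]
    rw [← this, pvRC_pvRC s hs]
  · left
    have : pvRC s = pvRC k := by rw [← h1, h, h2]
    have := congrArg pvRC this
    rwa [pvRC_pvRC s hs, pvRC_pvRC k hk] at this

-- membership of the canonical key among the canonical keys of the kept set
lemma canon_mem_iff (S : List String) (k : String) (hS : ∀ v ∈ S, pvValid v) (hk : pvValid k) :
    pvCanon k ∈ S.map pvCanon ↔ (k ∈ S ∨ pvRC k ∈ S) := by
  constructor
  · intro h
    obtain ⟨s, hsS, hse⟩ := List.mem_map.mp h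
    rcases canon_eq_elim s k (hS s hsS) hk hse with rfl | rfl
    · exact Or.inl hsS
    · exact Or.inr hsS
  · rintro (h | h)
    · exact List.mem_map.mpr ⟨k, h, rfl⟩
    · exact List.mem_map.mpr ⟨pvRC k, h, pvCanon_pvRC k hk⟩

-- joint invariant: A's fold from kept set S equals B's scan with seen = canonical keys of S, keep = S
lemma loop_inv (l : List String) (hl : ∀ k ∈ l, pvValid k)
    (S : PySem.Set String) (hS : ∀ v ∈ S, pvValid v) :
    ∃ S' : PySem.Set String,
      (l.foldl (fun st kmer => st.bind fun combined =>
          (rev_comp_motif kmer).map fun rc =>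
            if PySem.Set.contains combined rc then combined else PySem.Set.add combined kmer)
        (some S)) = some S' ∧
      pvScan (l.map (fun k => (k, pvRC k))) (S.map pvCanon) S = S' := by
  induction l generalizing S with
  | nil => exact ⟨S, rfl, rfl⟩
  | cons k t ih =>
    have hk : pvValid k := hl k (by simp)
    have hcontains : PySem.Set.contains (S.map pvCanon) (pvCanon k) = true ↔ (k ∈ S ∨ pvRC k ∈ S) := by
      simp only [PySem.Set.contains, List.contains_iff_mem]
      exact canon_mem_iff S k hS hk
    have hcanon : (if pvRC k < k then pvRC k else k) = pvCanon k := rfl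
    simp only [List.foldl_cons, Option.bind_some, rcA_valid k hk, Option.map_some,
      List.map_cons, pvScan, hcanon]
    have hsetmem : PySem.Set.contains S (pvRC k) = true ↔ pvRC k ∈ S := by
      simp [PySem.Set.contains]
    by_cases hrc : pvRC k ∈ S
    · -- A skips (rev comp already kept); B skips (canonical key present)
      rw [if_pos (hsetmem.mpr hrc), if_pos (hcontains.mpr (Or.inr hrc))]
      exact ih (fun x hx => hl x (by simp [hx])) S hS
    · rw [if_neg (by simp [PySem.Set.contains, hrc])]
      by_cases hkS : k ∈ S
      · -- A re-adds a kept kmer (no-op); B skips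
        rw [if_pos (hcontains.mpr (Or.inl hkS))]
        have hadd : PySem.Set.add S k = S := by simp [PySem.Set.add, hkS]
        rw [hadd]
        exact ih (fun x hx => hl x (by simp [hx])) S hS
      · -- A appends the kmer; B records its canonical key and appends the kmer
        have hnc : ¬ PySem.Set.contains (S.map pvCanon) (pvCanon k) = true := by
          rw [hcontains]; rintro (h | h); exact hkS h; exact hrc h
        rw [if_neg hnc]
        have hadd : PySem.Set.add S k = S ++ [k] := by simp [PySem.Set.add, hkS]
        have haddc : PySem.Set.add (S.map pvCanon) (pvCanon k) = (S ++ [k]).map pvCanon := by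
          simp only [PySem.Set.add]
          rw [if_neg hnc]
          simp
        rw [hadd, haddc]
        refine ih (fun x hx => hl x (by simp [hx])) (S ++ [k]) ?_
        intro v hv
        rcases List.mem_append.mp hv with h | h
        · exact hS v h
        · simp at h; subst h; exact hk
-- ===== VERDICT (by name: the statement is the Claim_ definition above) =====
theorem combine_kmers_list_spec : Claim_equal_combine_kmers_list := by
  intro all_kmers _ hpre
  have hl : ∀ k ∈ all_kmers, pvValid k := by
    intro k hk c hc
    have h1 := List.all_eq_true.mp hpre k hk
    simpa using List.all_eq_true.mp h1 c hc
  unfold Spec_combine_kmers_list combine_kmers_list combine_kmers_list_alt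
  obtain ⟨S', hA, hB⟩ := loop_inv all_kmers hl PySem.Set.empty (by simp [PySem.Set.empty])
  rw [hA, mapM_rcB all_kmers hl]
  simp only [zip_map_self]
  have hB' : pvScan (List.map (fun k => (k, pvRC k)) all_kmers) PySem.Set.empty [] = S' := hB
  rw [hB']
  rfl
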